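-- pv_equiv track=rewrite | github.com/haiyLiu/Multi-source-Knowledge-Enhancement-Framework | small_experiments/long_tail/long_tail.py | split_entity_frequency
-- ===== SOURCE A (Python) =====
-- def split_entity_frequency(entity_frequency, max=10):
--     result = {}
--     for key, value in entity_frequency.items():
--         if value < max:
--             range_start, range_end = value, value
--             range_key = f"{range_start}-{range_end}"
--             if range_key not in result:
--                 result[range_key] = {}
--             result[range_key][key] = value
--     return result
-- ===== SOURCE B (Python) =====
-- def split_entity_frequency(entity_frequency, max=10):
--     items = [(k, v) for k, v in entity_frequency.items() if v < max]
--     range_keys = list(dict.fromkeys(f"{v}-{v}" for _, v in items))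
--     return {rk: {k: v for k, v in items if f"{v}-{v}" == rk} for rk in range_keys}
-- ===== Notes on version B (the rewrite author's own statement) =====
-- stated objective: idiomatic
-- what changed: Replaces the incremental build-buckets-while-scanning loop (create-bucket-if-missing, then mutate the nested dict) by a declarative pipeline: filter once, dedup the range keys in first-occurrence order, then build the whole result with dict comprehensions, one filter pass per distinct range key.
import Mathlib
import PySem

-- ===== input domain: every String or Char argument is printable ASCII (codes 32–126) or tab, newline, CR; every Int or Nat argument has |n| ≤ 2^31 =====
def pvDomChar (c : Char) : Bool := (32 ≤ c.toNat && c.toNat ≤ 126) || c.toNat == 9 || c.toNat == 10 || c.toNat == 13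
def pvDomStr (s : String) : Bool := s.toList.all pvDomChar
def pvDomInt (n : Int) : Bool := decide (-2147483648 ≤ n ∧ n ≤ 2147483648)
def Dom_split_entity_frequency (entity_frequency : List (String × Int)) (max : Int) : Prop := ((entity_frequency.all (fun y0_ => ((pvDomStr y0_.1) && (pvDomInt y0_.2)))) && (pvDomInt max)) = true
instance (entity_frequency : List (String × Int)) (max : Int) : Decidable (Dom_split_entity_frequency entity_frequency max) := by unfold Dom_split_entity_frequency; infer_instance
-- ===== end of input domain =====

-- B replaces A's incremental bucket-building loop by a filter / dedup-of-range-keys / per-key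
-- comprehension pipeline (idiomatic, not faster); return values proved equal on every input.


-- ===== PORT A =====
-- loop body of A: if value < max, ensure the "v-v" bucket exists, then result[range_key][key] = value
def pvStepA (max : Int) (result : PySem.Dict String (PySem.Dict String Int)) (kv : String × Int) :
    PySem.Dict String (PySem.Dict String Int) :=
  if kv.2 < max then
    let range_key := PySem.Int.toStr kv.2 ++ "-" ++ PySem.Int.toStr kv.2
    let result := if result.contains range_key then result else result.insert range_key PySem.Dict.empty
    result.modify range_key PySem.Dict.empty (fun inner => inner.insert kv.1 kv.2)
  else result

def split_entity_frequency (entity_frequency : List (String × Int)) (max : Int) :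
    List (String × List (String × Int)) :=
  ((PySem.Dict.ofList entity_frequency).items.foldl (pvStepA max) PySem.Dict.empty).items.map
    (fun p => (p.1, p.2.items))

-- ===== PORT B =====
def split_entity_frequency_alt (entity_frequency : List (String × Int)) (max : Int) :
    List (String × List (String × Int)) :=
  let items := (PySem.Dict.ofList entity_frequency).items.filter (fun kv => decide (kv.2 < max))
  let range_keys := PySem.List.dedup (items.map (fun kv => PySem.Int.toStr kv.2 ++ "-" ++ PySem.Int.toStr kv.2))
  range_keys.map (fun rk =>
    (rk, (PySem.Dict.ofList (items.filter
            (fun kv => (PySem.Int.toStr kv.2 ++ "-" ++ PySem.Int.toStr kv.2) == rk))).items))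

-- ===== PRECONDITION & SPEC =====
def Spec_split_entity_frequency (entity_frequency : List (String × Int)) (max : Int) (out : List (String × List (String × Int))) : Prop := out = split_entity_frequency_alt entity_frequency max
instance (entity_frequency : List (String × Int)) (max : Int) (out : List (String × List (String × Int))) : Decidable (Spec_split_entity_frequency entity_frequency max out) := by unfold Spec_split_entity_frequency; infer_instance

-- ===== CLAIM (what is proved, stated in full; the proofs are below) =====
def Claim_equal_split_entity_frequency : Prop := ∀ (entity_frequency : List (String × Int)) (max : Int), Dom_split_entity_frequency entity_frequency max → Spec_split_entity_frequency entity_frequency max (split_entity_frequency entity_frequency max)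

-- ===== LEMMAS AND PROOFS =====

-- the range key f"{v}-{v}" of an item
def pvK (kv : String × Int) : String := PySem.Int.toStr kv.2 ++ "-" ++ PySem.Int.toStr kv.2

-- an association list with distinct keys round-trips through dict()
lemma pv_items_ofList_of_nodup {l : List (String × Int)} (h : (l.map Prod.fst).Nodup) :
    (PySem.Dict.ofList l).items = l := by
  have hfresh : ∀ a ∈ l, (PySem.Dict.empty : PySem.Dict String Int).contains a.1 = false := by
    intro a _; exact PySem.Dict.contains_empty _
  have := PySem.Dict.items_foldl_insert_fresh (l := l) (k := Prod.fst) (v := Prod.snd)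
      (d := (PySem.Dict.empty : PySem.Dict String Int)) hfresh h
  simpa using this

-- the loop of A, run over any association list with distinct keys, builds exactly the
-- dedup-of-range-keys grouping that B computes
lemma pv_loopA_inv (max : Int) (L : List (String × Int)) (h : (L.map Prod.fst).Nodup) :
    L.foldl (pvStepA max) PySem.Dict.empty
      = PySem.Dict.mk ((PySem.List.dedup ((L.filter (fun kv => decide (kv.2 < max))).map pvK)).map
          (fun rk => (rk, PySem.Dict.mk ((L.filter (fun kv => decide (kv.2 < max))).filter
              (fun kv => pvK kv == rk))))) := by
  induction L using List.reverseRecOn with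
  | nil => rfl
  | append_singleton L x ih =>
    have h' := h
    simp [List.nodup_append] at h'
    have hL : (L.map Prod.fst).Nodup := h'.1
    have hx1 : x.1 ∉ L.map Prod.fst := by
      intro hmem
      obtain ⟨⟨a, b⟩, hab, he⟩ := List.mem_map.mp hmem
      exact h'.2 a b hab he
    rw [List.foldl_append, List.foldl_cons, List.foldl_nil, ih hL]
    by_cases hv : x.2 < max
    · -- x is kept: it joins (or creates) the bucket with range key pvK x
      have hmod : ∀ (d : PySem.Dict String (PySem.Dict String Int)) (k : String)
          (f : PySem.Dict String Int → PySem.Dict String Int),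
          d.modify k PySem.Dict.empty f = d.insert k (f (d.getD k PySem.Dict.empty)) :=
        fun _ _ _ => rfl
      rw [List.filter_append]
      have hfx : List.filter (fun kv => decide (kv.2 < max)) [x] = [x] := by simp [hv]
      rw [hfx, List.map_append]
      have hmx : List.map pvK [x] = [pvK x] := by simp
      rw [hmx]
      set F := L.filter (fun kv => decide (kv.2 < max)) with hF
      set g : String → String × PySem.Dict String Int :=
        (fun rk => (rk, PySem.Dict.mk (List.filter (fun kv => pvK kv == rk) F))) with hg
      set D := PySem.List.dedup (List.map pvK F) with hD
      simp only [pvStepA, if_pos hv]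
      have hpk : PySem.Int.toStr x.2 ++ "-" ++ PySem.Int.toStr x.2 = pvK x := rfl
      rw [hpk]
      have hkeys : (PySem.Dict.mk (D.map g)).keys = D := by
        simp [PySem.Dict.keys, hg, List.map_map, Function.comp_def]
      have hkeysnd : (PySem.Dict.mk (D.map g)).keys.Nodup := by
        rw [hkeys, hD]; exact PySem.List.nodup_dedup _
      have hcont : (PySem.Dict.mk (D.map g)).contains (pvK x) = decide (pvK x ∈ List.map pvK F) := by
        rw [PySem.Dict.contains_eq_decide_mem_keys, hkeys]
        simp [hD]
      by_cases hm : pvK x ∈ List.map pvK F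
      · -- the bucket pvK x already exists: x is appended to it, key order unchanged
        have hct : (PySem.Dict.mk (D.map g)).contains (pvK x) = true := by
          rw [hcont]; simpa using hm
        simp only [hct, if_true]
        rw [hmod]
        have hmem : (pvK x, PySem.Dict.mk (List.filter (fun kv => pvK kv == pvK x) F))
            ∈ (PySem.Dict.mk (D.map g)).items := by
          show _ ∈ D.map g
          have : pvK x ∈ D := by rw [hD]; exact (PySem.List.mem_dedup _ _).mpr hm
          exact List.mem_map_of_mem this
        rw [PySem.Dict.getD_of_mem_items _ hmem hkeysnd]
        have hxnotF : (PySem.Dict.mk (List.filter (fun kv => pvK kv == pvK x) F)).contains x.1 = false := by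
          rw [PySem.Dict.contains_eq_decide_mem_keys]
          simp only [decide_eq_false_iff_not, PySem.Dict.keys]
          intro hmem'
          apply hx1
          obtain ⟨p, hp, hpe⟩ := List.mem_map.mp hmem'
          have hpL : p ∈ L := List.mem_of_mem_filter (List.mem_of_mem_filter hp)
          exact hpe ▸ List.mem_map_of_mem hpL
        have hinner : (PySem.Dict.mk (List.filter (fun kv => pvK kv == pvK x) F)).insert x.1 x.2
            = PySem.Dict.mk (List.filter (fun kv => pvK kv == pvK x) F ++ [x]) := by
          apply PySem.Dict.ext
          rw [PySem.Dict.items_insert_of_not_contains _ _ hxnotF]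
        rw [hinner]
        have hdd : PySem.List.dedup (List.map pvK F ++ [pvK x]) = D := by
          rw [hD]
          simp only [PySem.List.dedup_eq_ofList, PySem.Set.ofList_append_singleton]
          exact PySem.Set.add_of_mem ((PySem.Set.mem_ofList _ _).mpr hm)
        rw [hdd]
        apply PySem.Dict.ext
        rw [PySem.Dict.items_insert_of_contains _ _ hct]
        show (D.map g).map _ = D.map _
        rw [List.map_map]
        apply List.map_congr_left
        intro rk hrk
        by_cases hrx : rk = pvK x
        · subst hrx
          simp [hg, List.filter_append]
        · have hne : (pvK x == rk) = false := by
            simpa using fun he => hrx he.symm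
          simp [hg, hrx, List.filter_append, hne]
      · -- a new bucket for pvK x is created and appended at the end
        have hct : (PySem.Dict.mk (D.map g)).contains (pvK x) = false := by
          rw [hcont]; simpa using hm
        simp only [hct, Bool.false_eq_true, if_false]
        rw [hmod]
        rw [PySem.Dict.getD_insert_self]
        have hemp : (PySem.Dict.empty : PySem.Dict String Int).insert x.1 x.2 = PySem.Dict.mk [x] := by
          apply PySem.Dict.ext
          rw [PySem.Dict.items_insert_of_not_contains _ _ (PySem.Dict.contains_empty _)]
          rfl
        rw [hemp, PySem.Dict.insert_insert_self]
        apply PySem.Dict.ext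
        rw [PySem.Dict.items_insert_of_not_contains _ _ hct]
        have hdd : PySem.List.dedup (List.map pvK F ++ [pvK x]) = D ++ [pvK x] := by
          rw [hD]
          simp only [PySem.List.dedup_eq_ofList, PySem.Set.ofList_append_singleton]
          exact PySem.Set.add_of_not_mem (fun hc => hm ((PySem.Set.mem_ofList _ _).mp hc))
        rw [hdd, List.map_append]
        show D.map g ++ [(pvK x, PySem.Dict.mk [x])] = D.map _ ++ _
        congr 1
        · apply List.map_congr_left
          intro rk hrk
          have hrkF : rk ∈ List.map pvK F := (PySem.List.mem_dedup _ _).mp (hD ▸ hrk)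
          have hne : (pvK x == rk) = false := by
            simp only [beq_eq_false_iff_ne, ne_eq]
            intro he
            exact hm (he ▸ hrkF)
          simp [hg, List.filter_append, hne]
        · have hnil : List.filter (fun kv => pvK kv == pvK x) F = [] := by
            rw [List.filter_eq_nil_iff]
            intro kv hkv hbe
            have heq : pvK kv = pvK x := by simpa using hbe
            exact hm (heq ▸ List.mem_map_of_mem hkv)
          simp [List.filter_append, hnil]
    · simp [pvStepA, hv, List.filter_append]

-- ===== VERDICT (by name: the statement is the Claim_ definition above) =====
theorem split_entity_frequency_spec : Claim_equal_split_entity_frequency := by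
  intro ef max _
  unfold Spec_split_entity_frequency
  have hnd : (((PySem.Dict.ofList ef).items).map Prod.fst).Nodup := by
    simpa [PySem.Dict.keys] using PySem.Dict.nodup_keys_ofList (ps := ef)
  simp only [split_entity_frequency, split_entity_frequency_alt]
  rw [pv_loopA_inv max _ hnd]
  simp only [List.map_map]
  apply List.map_congr_left
  intro rk _
  simp only [Function.comp]
  refine congrArg (fun t => (rk, t)) ?_
  have hsubl : ∀ q : (String × Int) → Bool,
      (((((PySem.Dict.ofList ef).items.filter (fun kv => decide (kv.2 < max))).filter q).map Prod.fst)).Nodup := by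
    intro q
    exact List.Nodup.sublist (List.Sublist.map _ ((List.filter_sublist).trans (List.filter_sublist))) hnd
  rw [pv_items_ofList_of_nodup (hsubl _)]
  simp [pvK]
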